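-- pv_equiv track=rewrite | github.com/fchavelli/tsseg | demo/plotting.py | _iter_segments
-- ===== SOURCE A (Python) =====
-- from typing import Iterable, Sequence
--
-- def _iter_segments(states: Sequence[int]) -> Iterable[tuple[int, int, int]]:
--     start = 0
--     current = states[0]
--     for idx in range(1, len(states)):
--         if states[idx] != current:
--             yield start, idx, current
--             start = idx
--             current = states[idx]
--     yield start, len(states), current
-- ===== SOURCE B (Python) =====
-- from typing import Iterable, Sequence
--
-- def _iter_segments(states: Sequence[int]) -> Iterable[tuple[int, int, int]]:
--     n = len(states)
--     bounds = [0] + [i for i in range(1, n) if states[i] != states[i - 1]] + [n]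
--     for s, e in zip(bounds, bounds[1:]):
--         yield s, e, states[s]
-- ===== Notes on version B (the rewrite author's own statement) =====
-- stated objective: alternative
-- what changed: Replaced the incremental start/current state machine with a two-phase 'collect all change-point boundaries, then emit one segment per consecutive boundary pair' structure.
-- outside the precondition, e.g. on _iter_segments([]): A raises IndexError, B raises IndexError
import Mathlib
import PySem

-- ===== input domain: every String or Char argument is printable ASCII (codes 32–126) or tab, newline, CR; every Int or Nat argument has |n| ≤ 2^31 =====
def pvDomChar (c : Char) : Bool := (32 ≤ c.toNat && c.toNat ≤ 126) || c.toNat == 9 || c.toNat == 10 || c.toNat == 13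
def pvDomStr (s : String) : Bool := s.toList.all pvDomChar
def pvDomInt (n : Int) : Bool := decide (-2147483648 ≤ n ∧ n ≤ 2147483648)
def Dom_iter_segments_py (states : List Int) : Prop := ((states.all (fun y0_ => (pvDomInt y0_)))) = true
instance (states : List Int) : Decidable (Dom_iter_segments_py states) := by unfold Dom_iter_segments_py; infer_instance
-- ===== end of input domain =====

-- B replaces A's incremental start/current state machine by a two-phase decomposition
-- (collect all change-point boundaries, then emit one segment per consecutive boundary pair); same cost.

-- ===== PORT A =====
-- the for-loop of A over range(1, len(states)) with state (start, current, out);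
-- states[idx] is in range for every idx the loop visits, and states[0] is guarded by Pre_ (states ≠ [])
def iterSegLoopA (states : List Int) : Int × Int × List (Int × Int × Int) :=
  (PySem.List.pyRange 1 (states.length : Int) 1).foldl
    (fun st idx =>
      let (start, current, out) := st
      if PySem.List.pyGetD states idx 0 ≠ current then
        (idx, PySem.List.pyGetD states idx 0, out ++ [(start, idx, current)])
      else (start, current, out))
    (0, PySem.List.pyGetD states 0 0, [])

def iter_segments_py (states : List Int) : List (Int × Int × Int) :=
  let (start, current, out) := iterSegLoopA states
  out ++ [(start, (states.length : Int), current)]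

-- ===== PORT B =====
-- bounds = [0] + [i for i in range(1, n) if states[i] != states[i-1]] + [n]
def iterSegBoundsB (states : List Int) : List Int :=
  [0] ++ ((PySem.List.pyRange 1 (states.length : Int) 1).filter
    (fun i => PySem.List.pyGetD states i 0 ≠ PySem.List.pyGetD states (i - 1) 0)) ++ [(states.length : Int)]

-- for s, e in zip(bounds, bounds[1:]): yield s, e, states[s]
def iter_segments_py_alt (states : List Int) : List (Int × Int × Int) :=
  let bounds := iterSegBoundsB states
  (bounds.zip bounds.tail).map (fun p : Int × Int => (p.1, p.2, PySem.List.pyGetD states p.1 0))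

-- ===== PRECONDITION & SPEC =====
-- Python A raises IndexError on the empty sequence (states[0]); B raises there too, so [] is excluded.
def Pre_iter_segments_py (states : List Int) : Prop := states ≠ []
instance (states : List Int) : Decidable (Pre_iter_segments_py states) := by unfold Pre_iter_segments_py; infer_instance
def pvWitness_iter_segments_py : List Int := ([1, 1, 2])

def Spec_iter_segments_py (states : List Int) (out : List (Int × Int × Int)) : Prop := out = iter_segments_py_alt states
instance (states : List Int) (out : List (Int × Int × Int)) : Decidable (Spec_iter_segments_py states out) := by unfold Spec_iter_segments_py; infer_instance

-- ===== CLAIM (what is proved, stated in full; the proofs are below) =====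
def Claim_equal_iter_segments_py : Prop := ∀ (states : List Int), Dom_iter_segments_py states → Pre_iter_segments_py states → Spec_iter_segments_py states (iter_segments_py states)

-- ===== LEMMAS AND PROOFS =====

-- proof-side abbreviations: B's boundary list without its final bound, and the pair-to-segment map
def segBs (xs : List Int) : List Int :=
  0 :: (PySem.List.pyRange 1 (xs.length : Int) 1).filter
    (fun i => PySem.List.pyGetD xs i 0 ≠ PySem.List.pyGetD xs (i - 1) 0)

def segOut (xs : List Int) (bs : List Int) : List (Int × Int × Int) :=
  (bs.zip bs.tail).map (fun p : Int × Int => (p.1, p.2, PySem.List.pyGetD xs p.1 0))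

theorem pyGetD_append_left (xs : List Int) (v : Int) {i : Int} (h0 : 0 ≤ i) (h1 : i < (xs.length : Int)) :
    PySem.List.pyGetD (xs ++ [v]) i 0 = PySem.List.pyGetD xs i 0 := by
  rw [PySem.List.pyGetD_eq_getElem _ _ h0 (by simp; omega),
      PySem.List.pyGetD_eq_getElem _ _ h0 h1,
      List.getElem_append_left (by omega)]

theorem pyGetD_append_length (xs : List Int) (v : Int) :
    PySem.List.pyGetD (xs ++ [v]) (xs.length : Int) 0 = v := by
  rw [PySem.List.pyGetD_eq_getElem _ _ (by positivity) (by simp)]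
  simp

theorem pyGetD_last (xs : List Int) (h : xs ≠ []) :
    PySem.List.pyGetD xs ((xs.length : Int) - 1) 0 = xs.getLastD 0 := by
  have hn : 0 < xs.length := List.length_pos_iff.mpr h
  rw [PySem.List.pyGetD_eq_getElem _ _ (by omega) (by omega), List.getLastD_eq_getLast?,
      List.getLast?_eq_getElem?, List.getElem?_eq_getElem (by omega)]
  simp only [Option.getD_some]
  congr 1
  omega

theorem segBs_mem (xs : List Int) {b : Int} (hb : b ∈ segBs xs) :
    0 ≤ b ∧ b < (xs.length : Int) ∨ (b = 0 ∧ xs.length = 0) := by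
  rcases List.mem_cons.mp hb with h0 | hb'
  · subst h0
    rcases Nat.eq_zero_or_pos xs.length with h | h
    · right; exact ⟨rfl, h⟩
    · left; exact ⟨le_rfl, by exact_mod_cast h⟩
  · have := PySem.List.mem_pyRange_one.mp (List.mem_of_mem_filter hb')
    left; exact ⟨by omega, this.2⟩

theorem zip_tail_snoc (bs : List Int) (e : Int) (h : bs ≠ []) :
    (bs ++ [e]).zip (bs ++ [e]).tail = bs.zip bs.tail ++ [(bs.getLastD 0, e)] := by
  induction bs with
  | nil => exact absurd rfl h
  | cons b bs ih =>
    cases bs with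
    | nil => simp
    | cons c bs => simpa using ih (by simp)

-- the boundary list of xs ++ [v], in terms of that of xs
theorem segBs_snoc (xs : List Int) (v : Int) (h : xs ≠ []) :
    segBs (xs ++ [v]) =
      segBs xs ++ (if v ≠ xs.getLastD 0 then [(xs.length : Int)] else []) := by
  have hn : 1 ≤ (xs.length : Int) := by
    have := List.length_pos_iff.mpr h; exact_mod_cast this
  unfold segBs
  rw [show ((xs ++ [v]).length : Int) = (xs.length : Int) + 1 by simp,
      PySem.List.pyRange_one_succ_right hn, List.filter_append]
  have hcong : ∀ i ∈ PySem.List.pyRange 1 (xs.length : Int) 1,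
      (decide (PySem.List.pyGetD (xs ++ [v]) i 0 ≠ PySem.List.pyGetD (xs ++ [v]) (i - 1) 0))
      = (decide (PySem.List.pyGetD xs i 0 ≠ PySem.List.pyGetD xs (i - 1) 0)) := by
    intro i hi
    have hi' := PySem.List.mem_pyRange_one.mp hi
    rw [pyGetD_append_left xs v (by omega) hi'.2,
        pyGetD_append_left xs v (by omega) (by omega)]
  rw [List.filter_congr hcong]
  have hlastmem : (PySem.List.pyGetD (xs ++ [v]) ((xs.length : Int)) 0
      ≠ PySem.List.pyGetD (xs ++ [v]) ((xs.length : Int) - 1) 0) ↔ (v ≠ xs.getLastD 0) := by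
    rw [pyGetD_append_length, pyGetD_append_left xs v (by omega) (by omega), pyGetD_last xs h]
  have hsing : List.filter
      (fun i => decide (PySem.List.pyGetD (xs ++ [v]) i 0 ≠ PySem.List.pyGetD (xs ++ [v]) (i - 1) 0))
      [((xs.length : Int))] = if v ≠ xs.getLastD 0 then [((xs.length : Int))] else [] := by
    rw [List.filter_singleton]
    by_cases hv : v ≠ xs.getLastD 0
    · rw [if_pos hv]
      simp only [decide_eq_true (hlastmem.mpr hv), cond_true]
    · rw [if_neg hv]
      simp only [decide_eq_false (fun hc => hv (hlastmem.mp hc)), cond_false]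
  rw [hsing]
  simp

-- segments read only positions below xs.length, so appending to xs does not change them
theorem segOut_append (xs : List Int) (v : Int) (bs : List Int)
    (hbs : ∀ b ∈ bs, 0 ≤ b ∧ b < (xs.length : Int)) :
    segOut (xs ++ [v]) bs = segOut xs bs := by
  unfold segOut
  apply List.map_congr_left
  intro p hp
  obtain ⟨a, b⟩ := p
  have h1 : a ∈ bs := (List.of_mem_zip hp).1
  have := hbs a h1
  simp only [pyGetD_append_left xs v this.1 this.2]

-- the invariant: A's loop state is (last boundary, last value, segments of the boundary prefix)
theorem iterSeg_inv (states : List Int) (h : states ≠ []) :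
    iterSegLoopA states =
      ((segBs states).getLastD 0, states.getLastD 0, segOut states (segBs states))
    ∧ PySem.List.pyGetD states ((segBs states).getLastD 0) 0 = states.getLastD 0
    ∧ 0 ≤ (segBs states).getLastD 0 ∧ (segBs states).getLastD 0 < (states.length : Int) := by
  induction states using List.reverseRecOn with
  | nil => exact absurd rfl h
  | append_singleton xs v ih =>
    by_cases hxs : xs = []
    · subst hxs
      simp [iterSegLoopA, segBs, segOut, PySem.List.pyRange_one_eq_nil]
    · obtain ⟨ih1, ih2, ih3, ih4⟩ := ih hxs
      have hn : 1 ≤ (xs.length : Int) := by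
        have := List.length_pos_iff.mpr hxs; exact_mod_cast this
      have hlen : ((xs ++ [v]).length : Int) = (xs.length : Int) + 1 := by simp
      -- A's loop over the longer range = one extra step on the old loop state
      have hloop : iterSegLoopA (xs ++ [v]) =
          (fun st idx =>
            let (start, current, out) := st
            if PySem.List.pyGetD (xs ++ [v]) idx 0 ≠ current then
              (idx, PySem.List.pyGetD (xs ++ [v]) idx 0, out ++ [(start, idx, current)])
            else (start, current, out)) (iterSegLoopA xs) ((xs.length : Int)) := by
        unfold iterSegLoopA
        rw [hlen, PySem.List.pyRange_one_succ_right hn, List.foldl_append, List.foldl_cons,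
            List.foldl_nil, pyGetD_append_left xs v le_rfl (by omega)]
        have hfold := PySem.List.foldl_congr_mem (PySem.List.pyRange 1 (xs.length : Int) 1)
          (fun st idx =>
            let (start, current, out) := st
            if PySem.List.pyGetD (xs ++ [v]) idx 0 ≠ current then
              (idx, PySem.List.pyGetD (xs ++ [v]) idx 0, out ++ [(start, idx, current)])
            else (start, current, out))
          (fun st idx =>
            let (start, current, out) := st
            if PySem.List.pyGetD xs idx 0 ≠ current then
              (idx, PySem.List.pyGetD xs idx 0, out ++ [(start, idx, current)])
            else (start, current, out))
          ((0 : Int), PySem.List.pyGetD xs 0 0, ([] : List (Int × Int × Int)))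
          (by
            intro acc i hi
            have hi' := PySem.List.mem_pyRange_one.mp hi
            obtain ⟨s, c, o⟩ := acc
            simp only [pyGetD_append_left xs v (by omega) hi'.2])
        rw [hfold]
      have hstep : PySem.List.pyGetD (xs ++ [v]) ((xs.length : Int)) 0 = v :=
        pyGetD_append_length xs v
      have hbsmem : ∀ b ∈ segBs xs, 0 ≤ b ∧ b < (xs.length : Int) := by
        intro b hb
        rcases segBs_mem xs hb with h1 | h1
        · exact h1
        · exact absurd (List.length_eq_zero_iff.mp h1.2) hxs
      have hlast : (xs ++ [v]).getLastD 0 = v := List.getLastD_concat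
      by_cases hv : v ≠ xs.getLastD 0
      · -- new segment starts at xs.length
        have hbs : segBs (xs ++ [v]) = segBs xs ++ [(xs.length : Int)] := by
          rw [segBs_snoc xs v hxs, if_pos hv]
        have hout : segOut (xs ++ [v]) (segBs (xs ++ [v])) =
            segOut xs (segBs xs) ++ [((segBs xs).getLastD 0, (xs.length : Int), xs.getLastD 0)] := by
          rw [hbs]
          unfold segOut
          rw [zip_tail_snoc _ _ (by simp [segBs])]
          rw [List.map_append]
          congr 1
          · exact segOut_append xs v (segBs xs) hbsmem
          · simp only [List.map_cons, List.map_nil]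
            rw [pyGetD_append_left xs v ih3 ih4, ih2]
        refine ⟨?_, ?_, ?_, ?_⟩
        · rw [hloop, ih1]
          simp only [hstep]
          rw [if_pos hv]
          rw [hout, hbs, List.getLastD_concat, hlast]
        · rw [hbs, List.getLastD_concat, hstep, hlast]
        · rw [hbs, List.getLastD_concat]; omega
        · rw [hbs, List.getLastD_concat, hlen]; omega
      · -- same value: the last segment just grows
        replace hv : v = xs.getLastD 0 := of_not_not hv
        have hbs : segBs (xs ++ [v]) = segBs xs := by
          rw [segBs_snoc xs v hxs, if_neg (by simp [hv])]; simp
        have hout : segOut (xs ++ [v]) (segBs (xs ++ [v])) = segOut xs (segBs xs) := by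
          rw [hbs]; exact segOut_append xs v (segBs xs) hbsmem
        refine ⟨?_, ?_, ?_, ?_⟩
        · rw [hloop, ih1]
          simp only [hstep]
          rw [if_neg (by simp [hv])]
          rw [hout, hbs, hlast, hv]
        · rw [hbs, hlast, pyGetD_append_left xs v ih3 ih4, ih2, hv]
        · rw [hbs]; exact ih3
        · rw [hbs, hlen]; omega

-- ===== VERDICT (by name: the statement is the Claim_ definition above) =====
theorem iter_segments_py_spec : Claim_equal_iter_segments_py := by
  intro states _ hpre
  unfold Spec_iter_segments_py
  obtain ⟨h1, h2, _, _⟩ := iterSeg_inv states hpre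
  have hA : iter_segments_py states =
      segOut states (segBs states)
        ++ [((segBs states).getLastD 0, (states.length : Int), states.getLastD 0)] := by
    unfold iter_segments_py
    rw [h1]
  have hB : iter_segments_py_alt states =
      segOut states (segBs states)
        ++ [((segBs states).getLastD 0, (states.length : Int),
             PySem.List.pyGetD states ((segBs states).getLastD 0) 0)] := by
    show ((segBs states ++ [(states.length : Int)]).zip
           (segBs states ++ [(states.length : Int)]).tail).map
           (fun p : Int × Int => (p.1, p.2, PySem.List.pyGetD states p.1 0)) = _
    rw [zip_tail_snoc _ _ (by simp [segBs]), List.map_append]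
    rfl
  rw [hA, hB, h2]
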